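-- pv_equiv track=rewrite | github.com/Maicon-g14/Logica-de-Programacao | Pesquisas/lab16.py | pagsResposta
-- ===== SOURCE A (Python) =====
-- def pagsResposta(paginas, termosBusca):
--     resp = []
--     for i in paginas:   #para cada uma das paginas
--         posicoes = []
--         dados = i.split()   #separa-se frases em palavras
--         for j in termosBusca: #para cada uma das palavras a serem eliminadas
--             k = dados.index(j) if j in dados else -1    #encontra-se sua posição ou retorna -1 se nao existir
--             if k != -1: #caso exista o termo de busca na frase
--                 posicoes.append(k)  #armazena-se suas posições em um vetor
--         if len(posicoes) == len(termosBusca):    #se o vetor tiver o mesmo tamanho dos itens a serem buscados, ou seja, contiver todos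
--             resp.append(1)  #define-se 1 ao laço
--         else:
--             resp.append(0)  #senao 0
--     return resp
-- ===== SOURCE B (Python) =====
-- def pagsResposta(paginas, termosBusca):
--     index = {}
--     for i, pag in enumerate(paginas):
--         for w in pag.split():
--             index.setdefault(w, set()).add(i)
--     result = set(range(len(paginas)))
--     for t in termosBusca:
--         result &= index.get(t, set())
--     return [1 if i in result else 0 for i in range(len(paginas))]
-- ===== Notes on version B (the rewrite author's own statement) =====
-- stated objective: faster
-- what changed: A re-scans every page's word list once per search term (with list.index); B builds an inverted index word->set of page indices in one pass, intersects the page sets of the search terms, and emits the 0/1 flags from the resulting set.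
import Mathlib
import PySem

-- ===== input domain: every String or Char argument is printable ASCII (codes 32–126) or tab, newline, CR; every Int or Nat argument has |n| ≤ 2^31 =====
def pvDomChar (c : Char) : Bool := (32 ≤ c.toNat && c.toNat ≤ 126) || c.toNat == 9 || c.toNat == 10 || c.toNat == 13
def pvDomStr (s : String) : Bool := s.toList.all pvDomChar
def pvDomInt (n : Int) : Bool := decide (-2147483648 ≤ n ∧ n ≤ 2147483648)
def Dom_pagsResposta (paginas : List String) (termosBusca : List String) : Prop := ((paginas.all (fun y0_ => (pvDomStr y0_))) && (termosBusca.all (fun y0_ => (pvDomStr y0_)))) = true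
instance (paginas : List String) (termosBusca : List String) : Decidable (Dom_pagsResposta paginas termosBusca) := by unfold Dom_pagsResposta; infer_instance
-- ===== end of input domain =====

-- B replaces A's per-page scan over the search terms (with list.index) by an inverted
-- index word → pages built once, then intersected per term (objective: faster, measured).

-- ===== PORT A =====
def pagsResposta (paginas : List String) (termosBusca : List String) : List Int :=
  paginas.foldl (fun resp i =>
    let dados := PySem.Str.split₀ i
    let posicoes : List Int := termosBusca.foldl (fun posicoes j =>
      let k : Int := if dados.contains j then (((PySem.List.index? dados j).getD 0 : Nat) : Int) else -1
      if k ≠ -1 then posicoes ++ [k] else posicoes) []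
    if posicoes.length = termosBusca.length then resp ++ [1] else resp ++ [0]) []

-- ===== PORT B =====
def pagsResposta_alt (paginas : List String) (termosBusca : List String) : List Int :=
  let index := (PySem.List.enumerate paginas 0).foldl (fun d p =>
    (PySem.Str.split₀ p.2).foldl
      (fun d w => d.modify w PySem.Set.empty (fun s => PySem.Set.add s p.1)) d)
    PySem.Dict.empty
  let result := termosBusca.foldl
    (fun r t => PySem.Set.inter r (index.getD t PySem.Set.empty))
    (PySem.Set.ofList (PySem.List.pyRange 0 paginas.length 1))
  (PySem.List.pyRange 0 paginas.length 1).map (fun i => if PySem.Set.contains result i then 1 else 0)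

-- ===== PRECONDITION & SPEC =====
def Spec_pagsResposta (paginas : List String) (termosBusca : List String) (out : List Int) : Prop := out = pagsResposta_alt paginas termosBusca
instance (paginas : List String) (termosBusca : List String) (out : List Int) : Decidable (Spec_pagsResposta paginas termosBusca out) := by unfold Spec_pagsResposta; infer_instance

-- ===== CLAIM (what is proved, stated in full; the proofs are below) =====
def Claim_equal_pagsResposta : Prop := ∀ (paginas : List String) (termosBusca : List String), Dom_pagsResposta paginas termosBusca → Spec_pagsResposta paginas termosBusca (pagsResposta paginas termosBusca)

-- ===== LEMMAS AND PROOFS =====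

-- A's inner loop appends one position per term found; its length counts found terms.
theorem pv_inner_len (dados : List String) (termos : List String) (acc : List Int) :
    (termos.foldl (fun posicoes j =>
      if (if dados.contains j then (((PySem.List.index? dados j).getD 0 : Nat) : Int) else -1) ≠ -1
      then posicoes ++ [if dados.contains j then (((PySem.List.index? dados j).getD 0 : Nat) : Int) else -1]
      else posicoes) acc).length
      = acc.length + termos.countP (fun j => dados.contains j) := by
  induction termos generalizing acc with
  | nil => simp
  | cons j rest ih =>
      simp only [List.foldl_cons, List.countP_cons]
      rw [ih]
      by_cases hm : j ∈ dados
      · simp [hm]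
        omega
      · simp [hm]

-- A's result is a per-page map: 1 iff every term occurs among the page's words.
theorem pv_A_fold (termos : List String) (paginas : List String) (acc : List Int) :
    paginas.foldl (fun resp i =>
      let dados := PySem.Str.split₀ i
      let posicoes : List Int := termos.foldl (fun posicoes j =>
        let k : Int := if dados.contains j then (((PySem.List.index? dados j).getD 0 : Nat) : Int) else -1
        if k ≠ -1 then posicoes ++ [k] else posicoes) []
      if posicoes.length = termos.length then resp ++ [1] else resp ++ [0]) acc
      = acc ++ paginas.map (fun s => if ∀ t ∈ termos, t ∈ PySem.Str.split₀ s then (1 : Int) else 0) := by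
  induction paginas generalizing acc with
  | nil => simp
  | cons s rest ih =>
      simp only [List.foldl_cons, List.map_cons]
      rw [ih, pv_inner_len]
      by_cases h : ∀ t ∈ termos, t ∈ PySem.Str.split₀ s
      · have hc : termos.countP (fun j => (PySem.Str.split₀ s).contains j) = termos.length := by
          rw [List.countP_eq_length]
          intro t ht; simpa using h t ht
        rw [if_pos (by simpa using h), if_pos h]
        simp
      · have hc : termos.countP (fun j => (PySem.Str.split₀ s).contains j) ≠ termos.length := by
          rw [Ne, List.countP_eq_length]
          intro hall; exact h (fun t ht => by simpa using hall t ht)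
        rw [if_neg (by simpa using h), if_neg h]
        simp

theorem pv_A_eq_map (paginas termos : List String) :
    pagsResposta paginas termos
      = paginas.map (fun s => if ∀ t ∈ termos, t ∈ PySem.Str.split₀ s then (1 : Int) else 0) := by
  unfold pagsResposta
  simpa using pv_A_fold termos paginas []

-- membership in the per-page word loop of the index builder
theorem pv_inner_index (ws : List String) (n : Int) (d : PySem.Dict String (PySem.Set Int))
    (w : String) (i : Int) :
    i ∈ (ws.foldl (fun d w' => d.modify w' PySem.Set.empty (fun s => PySem.Set.add s n)) d).getD w PySem.Set.empty
      ↔ i ∈ d.getD w PySem.Set.empty ∨ (w ∈ ws ∧ i = n) := by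
  induction ws generalizing d with
  | nil => simp
  | cons w0 rest ih =>
      simp only [List.foldl_cons]
      rw [ih]
      rw [PySem.Dict.getD_modify]
      by_cases h : w = w0
      · subst h
        rw [if_pos rfl]
        simp only [PySem.Set.mem_add, List.mem_cons]
        tauto
      · rw [if_neg h]
        simp only [List.mem_cons]
        tauto

-- membership in the full inverted index
theorem pv_index_mem (pages : List String) (s : Int) (d : PySem.Dict String (PySem.Set Int))
    (w : String) (i : Int) :
    i ∈ ((PySem.List.enumerate pages s).foldl (fun d p =>
        (PySem.Str.split₀ p.2).foldl
          (fun d w' => d.modify w' PySem.Set.empty (fun st => PySem.Set.add st p.1)) d) d).getD w PySem.Set.empty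
      ↔ i ∈ d.getD w PySem.Set.empty
        ∨ ∃ (k : Nat) (h : k < pages.length), i = s + k ∧ w ∈ PySem.Str.split₀ pages[k] := by
  induction pages generalizing s d with
  | nil => simp [PySem.List.enumerate_nil]
  | cons p rest ih =>
      rw [PySem.List.enumerate_cons]
      simp only [List.foldl_cons]
      rw [ih, pv_inner_index]
      constructor
      · rintro (⟨hd | ⟨hw, hi⟩⟩ | ⟨k, hk, hi, hw⟩)
        · exact Or.inl hd
        · exact Or.inr ⟨0, by simp, by simpa using hi, by simpa using hw⟩
        · exact Or.inr ⟨k + 1, by simpa using hk, by omega, by simpa using hw⟩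
      · rintro (hd | ⟨k, hk, hi, hw⟩)
        · exact Or.inl (Or.inl hd)
        · match k with
          | 0 => exact Or.inl (Or.inr ⟨by simpa using hw, by simpa using hi⟩)
          | k + 1 =>
              exact Or.inr ⟨k, by simpa using hk, by omega, by simpa using hw⟩

-- membership in the intersection loop
theorem pv_inter_fold (termos : List String) (index : PySem.Dict String (PySem.Set Int))
    (r : PySem.Set Int) (i : Int) :
    i ∈ termos.foldl (fun r t => PySem.Set.inter r (index.getD t PySem.Set.empty)) r
      ↔ i ∈ r ∧ ∀ t ∈ termos, i ∈ index.getD t PySem.Set.empty := by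
  induction termos generalizing r with
  | nil => simp
  | cons t rest ih =>
      simp only [List.foldl_cons]
      rw [ih, PySem.Set.mem_inter]
      constructor
      · rintro ⟨⟨h1, h2⟩, h3⟩
        refine ⟨h1, fun u hu => ?_⟩
        rcases List.mem_cons.mp hu with rfl | hu'
        · exact h2
        · exact h3 u hu' 
      · rintro ⟨h1, h2⟩
        exact ⟨⟨h1, h2 t (List.mem_cons_self)⟩, fun u hu => h2 u (List.mem_cons_of_mem _ hu)⟩

-- ===== VERDICT (by name: the statement is the Claim_ definition above) =====
theorem pagsResposta_spec : Claim_equal_pagsResposta := by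
  intro paginas termos _
  unfold Spec_pagsResposta pagsResposta_alt
  rw [pv_A_eq_map]
  simp only
  apply List.ext_getElem
  · simp [PySem.List.length_pyRange_one]
  · intro k hk hk'
    have hkn : k < paginas.length := by simpa using hk
    simp only [List.getElem_map, PySem.List.getElem_pyRange_one]
    by_cases h : ∀ t ∈ termos, t ∈ PySem.Str.split₀ paginas[k]
    · rw [if_pos h, if_pos ?hc]
      case hc =>
        rw [PySem.Set.contains_iff, pv_inter_fold]
        refine ⟨by rw [PySem.Set.mem_ofList, PySem.List.mem_pyRange_one]; omega, fun t ht => ?_⟩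
        rw [pv_index_mem]
        exact Or.inr ⟨k, hkn, by omega, h t ht⟩
    · rw [if_neg h, if_neg ?hc]
      case hc =>
        intro hcon
        rw [PySem.Set.contains_iff, pv_inter_fold] at hcon
        refine h (fun t ht => ?_)
        have hm := hcon.2 t ht
        rw [pv_index_mem] at hm
        rcases hm with hemp | ⟨m, hmlt, he, hw⟩
        · simp [PySem.Dict.getD_empty, PySem.Set.empty] at hemp
        · have : m = k := by omega
          subst this
          exact hw
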